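-- pv_equiv track=rewrite | github.com/TLAquarius/APT_Webserver_Module | webserver_module_AIT/final_layer/llm_advisor.py | _extract_multi_anchor_blast_radius
-- ===== SOURCE A (Python) =====
-- def _extract_multi_anchor_blast_radius(timeline, max_logs=70, window_per_anchor=15):
--     """
--     Extracts up to `max_logs` from the timeline by identifying critical 'Anchors'
--     and grabbing the surrounding context logs. Merges overlapping windows.
--     """
--     total_len = len(timeline)
--     if total_len <= max_logs:
--         # If the session is small enough, just send the whole thing.
--         return timeline
--
--     anchor_indices = []
--
--     # 1. Identify all critical points of interest
--     for i, event in enumerate(timeline):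
--         if event.get('layer1_flagged'):
--             anchor_indices.append(i)
--         elif event.get('status_code') in [500, 502, 503, 504]:
--             anchor_indices.append(i)
--
--     # If no anchors found, anchor to the start and end
--     if not anchor_indices:
--         anchor_indices = [0, total_len - 1]
--
--     # 2. Calculate windows around anchors
--     indices_to_keep = set()
--     for anchor in anchor_indices:
--         start = max(0, anchor - window_per_anchor)
--         end = min(total_len, anchor + window_per_anchor + 1)
--         indices_to_keep.update(range(start, end))
--
--     # 3. Sort and enforce the max_logs cap
--     sorted_indices = sorted(list(indices_to_keep))
--
--     if len(sorted_indices) > max_logs: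
--         sorted_indices = sorted_indices[:max_logs]
--
--     # 4. Extract the logs
--     sampled_timeline = [timeline[i] for i in sorted_indices]
--
--     return sampled_timeline
-- ===== SOURCE B (Python) =====
-- def _extract_multi_anchor_blast_radius(timeline, max_logs=70, window_per_anchor=15):
--     """Merge the already-sorted anchor windows in one linear pass (no index set, no sort)."""
--     total_len = len(timeline)
--     if total_len <= max_logs:
--         return timeline
--
--     def is_anchor(event):
--         if event.get('layer1_flagged'):
--             return True
--         return event.get('status_code') in (500, 502, 503, 504)
--
--     anchors = [i for i, e in enumerate(timeline) if is_anchor(e)]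
--     if not anchors:
--         anchors = [0, total_len - 1]
--
--     # anchors are increasing, so their windows can be merged in one pass
--     sampled = []
--     cur = 0  # first index not yet covered by an already-emitted window
--     for a in anchors:
--         start = max(a - window_per_anchor, 0, cur)
--         end = min(a + window_per_anchor + 1, total_len)
--         if start < end:
--             sampled.extend(timeline[start:end])
--         if end > cur:
--             cur = end
--     if len(sampled) > max_logs:
--         sampled = sampled[:max_logs]
--     return sampled
-- ===== Notes on version B (the rewrite author's own statement) =====
-- stated objective: alternative
-- what changed: B merges the already-sorted anchor windows in a single linear pass with a 'first uncovered index' cursor and emits timeline slices directly, replacing A's set-of-indices accumulation, sort, truncation and index-by-index extraction.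
import Mathlib
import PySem

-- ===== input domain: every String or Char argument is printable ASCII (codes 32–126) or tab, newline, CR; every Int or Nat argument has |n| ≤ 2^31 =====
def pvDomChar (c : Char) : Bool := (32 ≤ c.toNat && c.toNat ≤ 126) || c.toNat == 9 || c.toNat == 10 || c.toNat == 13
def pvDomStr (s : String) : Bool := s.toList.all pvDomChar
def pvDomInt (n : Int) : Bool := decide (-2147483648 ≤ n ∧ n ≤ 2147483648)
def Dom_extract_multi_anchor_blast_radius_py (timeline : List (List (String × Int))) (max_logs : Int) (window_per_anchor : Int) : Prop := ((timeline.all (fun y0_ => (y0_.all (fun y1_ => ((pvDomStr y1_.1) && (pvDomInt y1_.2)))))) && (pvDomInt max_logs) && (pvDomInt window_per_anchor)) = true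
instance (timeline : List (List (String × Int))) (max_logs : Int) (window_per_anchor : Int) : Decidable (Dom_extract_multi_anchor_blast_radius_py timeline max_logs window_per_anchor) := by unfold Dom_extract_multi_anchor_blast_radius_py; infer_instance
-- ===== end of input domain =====

-- B replaces A's index-set accumulation + sort by one linear merge pass over the already-sorted anchor windows (objective: alternative algorithm; measured cost is comparable).

-- ===== PORT A =====
-- event.get(k) on the association-list encoding of the event dict: first match
def pvGetKey? (ev : List (String × Int)) (k : String) : Option Int :=
  (ev.find? (fun p => p.1 == k)).map (·.2)

-- truthiness of event.get('layer1_flagged') : None and 0 are falsy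
def pvA_truthy : Option Int → Bool
  | some v => v != 0
  | none => false

-- event.get('status_code') in [500, 502, 503, 504] (None matches nothing)
def pvA_status : Option Int → Bool
  | some v => v == 500 || v == 502 || v == 503 || v == 504
  | none => false

def extract_multi_anchor_blast_radius_py (timeline : List (List (String × Int))) (max_logs : Int) (window_per_anchor : Int) : List (List (String × Int)) :=
  let total_len : Int := timeline.length
  if total_len ≤ max_logs then timeline
  else
    let anchor_indices : List Int :=
      (PySem.List.enumerate timeline 0).foldl (fun acc p =>
        if pvA_truthy (pvGetKey? p.2 "layer1_flagged") then acc ++ [p.1]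
        else if pvA_status (pvGetKey? p.2 "status_code") then acc ++ [p.1]
        else acc) []
    let anchor_indices := if anchor_indices = [] then [0, total_len - 1] else anchor_indices
    let indices_to_keep : PySem.Set Int :=
      anchor_indices.foldl (fun s anchor =>
        PySem.Set.update s (PySem.List.pyRange (max 0 (anchor - window_per_anchor)) (min total_len (anchor + window_per_anchor + 1)) 1)) PySem.Set.empty
    let sorted_indices := PySem.List.sorted indices_to_keep (fun x => x) false
    let sorted_indices := if max_logs < (sorted_indices.length : Int) then PySem.List.slice sorted_indices none (some max_logs) else sorted_indices
    sorted_indices.map (fun i => (PySem.List.pyGet? timeline i).getD [])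

-- ===== PORT B =====
-- B's is_anchor(event) helper
def pvB_isAnchor (ev : List (String × Int)) : Bool :=
  if (pvGetKey? ev "layer1_flagged").getD 0 != 0 then true
  else match pvGetKey? ev "status_code" with
       | some v => v == 500 || v == 502 || v == 503 || v == 504
       | none => false

def extract_multi_anchor_blast_radius_py_alt (timeline : List (List (String × Int))) (max_logs : Int) (window_per_anchor : Int) : List (List (String × Int)) :=
  let total_len : Int := timeline.length
  if total_len ≤ max_logs then timeline
  else
    let anchors : List Int :=
      ((PySem.List.enumerate timeline 0).filter (fun p => pvB_isAnchor p.2)).map (·.1)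
    let anchors := if anchors = [] then [0, total_len - 1] else anchors
    -- single merge pass: st = (sampled so far, first index not yet covered)
    let st := anchors.foldl (fun (st : List (List (String × Int)) × Int) a =>
        ((if max (max (a - window_per_anchor) 0) st.2 < min (a + window_per_anchor + 1) total_len then
            st.1 ++ PySem.List.slice timeline (some (max (max (a - window_per_anchor) 0) st.2)) (some (min (a + window_per_anchor + 1) total_len))
          else st.1),
         if min (a + window_per_anchor + 1) total_len > st.2 then min (a + window_per_anchor + 1) total_len else st.2)) ([], 0)
    let sampled := st.1
    if max_logs < (sampled.length : Int) then PySem.List.slice sampled none (some max_logs) else sampled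

-- ===== PRECONDITION & SPEC =====
def Spec_extract_multi_anchor_blast_radius_py (timeline : List (List (String × Int))) (max_logs : Int) (window_per_anchor : Int) (out : List (List (String × Int))) : Prop := out = extract_multi_anchor_blast_radius_py_alt timeline max_logs window_per_anchor
instance (timeline : List (List (String × Int))) (max_logs : Int) (window_per_anchor : Int) (out : List (List (String × Int))) : Decidable (Spec_extract_multi_anchor_blast_radius_py timeline max_logs window_per_anchor out) := by unfold Spec_extract_multi_anchor_blast_radius_py; infer_instance

-- ===== CLAIM (what is proved, stated in full; the proofs are below) =====
def Claim_equal_extract_multi_anchor_blast_radius_py : Prop := ∀ (timeline : List (List (String × Int))) (max_logs : Int) (window_per_anchor : Int), Dom_extract_multi_anchor_blast_radius_py timeline max_logs window_per_anchor → Spec_extract_multi_anchor_blast_radius_py timeline max_logs window_per_anchor (extract_multi_anchor_blast_radius_py timeline max_logs window_per_anchor)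

-- ===== LEMMAS AND PROOFS =====

-- "index i is inside the (clamped) window of some anchor in as"
def pvCov (n w : Int) (as : List Int) (i : Int) : Bool :=
  as.any (fun a => decide (max 0 (a - w) ≤ i ∧ i < min n (a + w + 1)))

-- membership in A's accumulated index set
theorem pv_mem_keepSet (n w : Int) (as : List Int) (s : PySem.Set Int) (i : Int) :
    i ∈ as.foldl (fun s a =>
        PySem.Set.update s (PySem.List.pyRange (max 0 (a - w)) (min n (a + w + 1)) 1)) s ↔
      i ∈ s ∨ pvCov n w as i = true := by
  induction as generalizing s with
  | nil => simp [pvCov]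
  | cons a as ih =>
    simp only [List.foldl_cons, ih, PySem.Set.mem_update, PySem.List.mem_pyRange_one, pvCov,
      List.any_cons, Bool.or_eq_true, decide_eq_true_eq]
    tauto

theorem pv_nodup_keepSet (n w : Int) (as : List Int) (s : PySem.Set Int) (hs : s.Nodup) :
    (as.foldl (fun s a =>
        PySem.Set.update s (PySem.List.pyRange (max 0 (a - w)) (min n (a + w + 1)) 1)) s).Nodup := by
  induction as generalizing s with
  | nil => exact hs
  | cons a as ih => exact ih _ (PySem.Set.nodup_update _ _ hs)

-- sorted(A's set) is the covered indices in increasing order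
theorem pv_sortedA (n w : Int) (as : List Int) :
    PySem.List.sorted (as.foldl (fun s a =>
        PySem.Set.update s (PySem.List.pyRange (max 0 (a - w)) (min n (a + w + 1)) 1)) PySem.Set.empty)
      (fun x => x) false
      = (PySem.List.pyRange 0 n 1).filter (pvCov n w as) := by
  apply PySem.List.sorted_eq_of_perm_of_pairwise_lt
  · refine (List.perm_ext_iff_of_nodup (List.Nodup.filter _ (PySem.List.nodup_pyRange_one 0 n))
      (pv_nodup_keepSet n w as _ List.nodup_nil)).mpr ?_
    intro i
    rw [List.mem_filter, pv_mem_keepSet, PySem.List.mem_pyRange_one]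
    constructor
    · rintro ⟨_, h⟩; exact Or.inr h
    · rintro (h | h)
      · simp at h
      · refine ⟨?_, h⟩
        simp only [pvCov, List.any_eq_true, decide_eq_true_eq] at h
        obtain ⟨a, _, h1, h2⟩ := h
        omega
  · exact List.Pairwise.filter _ (PySem.List.pairwise_lt_pyRange_one 0 n)

-- filtering a range by (s ≤ ·)
theorem pv_filter_ge_pyRange (c e s : Int) (hsc : c ≤ s) :
    (PySem.List.pyRange c e 1).filter (fun i => decide (s ≤ i)) = PySem.List.pyRange s e 1 := by
  rcases le_or_gt e s with h | h
  · rw [PySem.List.pyRange_one_eq_nil h, List.filter_eq_nil_iff.mpr]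
    intro i hi
    rw [PySem.List.mem_pyRange_one] at hi
    simp; omega
  · rw [PySem.List.pyRange_one_append c s e hsc (le_of_lt h), List.filter_append,
      List.filter_eq_nil_iff.mpr, List.filter_eq_self.mpr, List.nil_append]
    · intro i hi; rw [PySem.List.mem_pyRange_one] at hi; simp; omega
    · intro i hi; rw [PySem.List.mem_pyRange_one] at hi; simp; omega

-- one merge step: the freshly emitted window plus the rest equals all covered indices from c on
theorem pv_merge_step (n w a c : Int) (as : List Int)
    (hc0 : 0 ≤ c) (hcn : c ≤ n)
    (hmono : ∀ a' ∈ as, a ≤ a') :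
    PySem.List.pyRange (max (max (a - w) 0) c) (min (a + w + 1) n) 1 ++
      (PySem.List.pyRange (max c (min (a + w + 1) n)) n 1).filter (pvCov n w as)
      = (PySem.List.pyRange c n 1).filter (pvCov n w (a :: as)) := by
  set e : Int := min (a + w + 1) n with he
  set c' : Int := max c e with hc'
  have hce : c ≤ c' := by omega
  have hc'n : c' ≤ n := by omega
  rw [PySem.List.pyRange_one_append c c' n hce hc'n, List.filter_append]
  have h2 : (PySem.List.pyRange c' n 1).filter (pvCov n w (a :: as))
      = (PySem.List.pyRange c' n 1).filter (pvCov n w as) := by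
    apply List.filter_congr
    intro i hi
    rw [PySem.List.mem_pyRange_one] at hi
    have : ¬ (max 0 (a - w) ≤ i ∧ i < min n (a + w + 1)) := by omega
    simp only [pvCov, List.any_cons, decide_eq_false this, Bool.false_or]
  rw [h2]
  congr 1
  rcases le_or_gt e c with hec | hec
  · have : c' = c := by omega
    rw [this, PySem.List.pyRange_one_eq_nil le_rfl, List.filter_nil,
      PySem.List.pyRange_one_eq_nil (by omega)]
  · have hc'e : c' = e := by omega
    have hstep : (PySem.List.pyRange c c' 1).filter (pvCov n w (a :: as))
        = (PySem.List.pyRange c c' 1).filter (fun i => decide (max (max (a - w) 0) c ≤ i)) := by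
      apply List.filter_congr
      intro i hi
      rw [PySem.List.mem_pyRange_one] at hi
      rw [Bool.eq_iff_iff]
      simp only [pvCov, List.any_cons, Bool.or_eq_true, decide_eq_true_eq, List.any_eq_true]
      constructor
      · rintro (h | ⟨a', ha', h⟩)
        · omega
        · have := hmono a' ha'; omega
      · intro h
        exact Or.inl ⟨by omega, by omega⟩
    rw [hstep, pv_filter_ge_pyRange c c' _ (by omega)]
    congr 1
    omega

-- a contiguous slice of the timeline is the indexed map over its index range
theorem pv_slice_eq_map (timeline : List (List (String × Int))) (s e : Int)
    (hs : 0 ≤ s) (hse : s < e) (he : e ≤ (timeline.length : Int)) :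
    PySem.List.slice timeline (some s) (some e)
      = (PySem.List.pyRange s e 1).map (fun i => (PySem.List.pyGet? timeline i).getD []) := by
  rw [PySem.List.slice_of_nonneg timeline hs (by omega) (by omega) he]
  apply List.ext_getElem
  · simp [PySem.List.length_pyRange_one]
    omega
  · intro k h1 h2
    simp only [List.getElem_map, PySem.List.getElem_pyRange_one, List.getElem_take, List.getElem_drop]
    have hk : s + (k : Int) = ((s.toNat + k : Nat) : Int) := by omega
    have hlt : s.toNat + k < timeline.length := by
      simp [PySem.List.length_pyRange_one] at h2; omega
    rw [hk, PySem.List.pyGet?_natCast timeline (s.toNat + k)]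
    simp [List.getElem?_eq_getElem hlt]

-- the whole merge loop of B
theorem pv_merge_loop (timeline : List (List (String × Int))) (w : Int) (as : List Int)
    (acc : List (List (String × Int))) (c : Int)
    (hc0 : 0 ≤ c) (hcn : c ≤ (timeline.length : Int))
    (hsorted : as.Pairwise (· ≤ ·)) :
    (as.foldl (fun (st : List (List (String × Int)) × Int) a =>
        ((if max (max (a - w) 0) st.2 < min (a + w + 1) (timeline.length : Int) then
            st.1 ++ PySem.List.slice timeline (some (max (max (a - w) 0) st.2)) (some (min (a + w + 1) (timeline.length : Int)))
          else st.1),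
         if min (a + w + 1) (timeline.length : Int) > st.2 then min (a + w + 1) (timeline.length : Int) else st.2)) (acc, c)).1
      = acc ++ ((PySem.List.pyRange c (timeline.length : Int) 1).filter (pvCov (timeline.length : Int) w as)).map
          (fun i => (PySem.List.pyGet? timeline i).getD []) := by
  induction as generalizing acc c with
  | nil =>
    simp only [List.foldl_nil]
    rw [List.filter_eq_nil_iff.mpr (by intro i _; simp [pvCov]), List.map_nil, List.append_nil]
  | cons a as ih =>
    simp only [List.foldl_cons]
    have hemit : (if max (max (a - w) 0) c < min (a + w + 1) (timeline.length : Int) then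
          acc ++ PySem.List.slice timeline (some (max (max (a - w) 0) c)) (some (min (a + w + 1) (timeline.length : Int)))
        else acc)
        = acc ++ (PySem.List.pyRange (max (max (a - w) 0) c) (min (a + w + 1) (timeline.length : Int)) 1).map
            (fun i => (PySem.List.pyGet? timeline i).getD []) := by
      split
      · rw [pv_slice_eq_map timeline _ _ (by omega) (by assumption) (by omega)]
      · rw [PySem.List.pyRange_one_eq_nil (by omega), List.map_nil, List.append_nil]
    rw [hemit]
    have hc' : (if min (a + w + 1) (timeline.length : Int) > c then min (a + w + 1) (timeline.length : Int) else c)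
        = max c (min (a + w + 1) (timeline.length : Int)) := by
      split <;> omega
    rw [hc', ih _ _ (by omega) (by omega)
      (List.Pairwise.of_cons hsorted : as.Pairwise (· ≤ ·))]
    rw [List.append_assoc, ← List.map_append,
      pv_merge_step (timeline.length : Int) w a c as hc0 hcn
        (fun a' ha' => (List.rel_of_pairwise_cons hsorted) ha')]

-- slice-from-the-left commutes with map
theorem pv_map_slice {α β : Type} (f : α → β) (xs : List α) (b : Option Int) :
    PySem.List.slice (xs.map f) none b = (PySem.List.slice xs none b).map f := by
  simp [PySem.List.slice, List.map_take]

-- A's two-branch anchor test equals B's is_anchor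
theorem pv_anchor_eq (ev : List (String × Int)) :
    (pvA_truthy (pvGetKey? ev "layer1_flagged") || pvA_status (pvGetKey? ev "status_code"))
      = pvB_isAnchor ev := by
  unfold pvB_isAnchor pvA_truthy pvA_status
  cases pvGetKey? ev "layer1_flagged" <;> cases pvGetKey? ev "status_code" <;>
    simp only [Option.getD_some, Option.getD_none, Bool.false_or, bne] <;>
    rw [Bool.eq_iff_iff] <;> simp

-- anchor indices of A's loop = B's comprehension, increasing and in range
theorem pv_anchors_eq (timeline : List (List (String × Int))) :
    (PySem.List.enumerate timeline 0).foldl (fun acc p =>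
        if pvA_truthy (pvGetKey? p.2 "layer1_flagged") then acc ++ [p.1]
        else if pvA_status (pvGetKey? p.2 "status_code") then acc ++ [p.1]
        else acc) ([] : List Int)
      = ((PySem.List.enumerate timeline 0).filter (fun p => pvB_isAnchor p.2)).map (·.1) := by
  have hcong := PySem.List.foldl_congr_mem'
    (l := PySem.List.enumerate timeline 0) (init := ([] : List Int))
    (f := fun (acc : List Int) p =>
      if pvA_truthy (pvGetKey? p.2 "layer1_flagged") then acc ++ [p.1]
      else if pvA_status (pvGetKey? p.2 "status_code") then acc ++ [p.1] else acc)
    (g := fun (acc : List Int) p => if pvB_isAnchor p.2 then acc ++ [p.1] else acc)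
    (by intro p _ acc
        dsimp only
        rw [← pv_anchor_eq]
        cases hT : pvA_truthy (pvGetKey? p.2 "layer1_flagged") <;>
          cases hS : pvA_status (pvGetKey? p.2 "status_code") <;> simp)
  rw [hcong]
  exact (PySem.List.foldl_append_if (fun p => pvB_isAnchor p.2) (fun p => p.1)
    (PySem.List.enumerate timeline 0) []).trans (List.nil_append _)

theorem pv_anchors_sorted (timeline : List (List (String × Int))) :
    (((PySem.List.enumerate timeline 0).filter (fun p => pvB_isAnchor p.2)).map (·.1)).Pairwise (· ≤ ·) := by
  rw [List.pairwise_map]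
  exact ((PySem.List.pairwise_lt_enumerate timeline 0).sublist
    List.filter_sublist).imp (fun h => le_of_lt h)

-- ===== VERDICT (by name: the statement is the Claim_ definition above) =====
theorem extract_multi_anchor_blast_radius_py_spec : Claim_equal_extract_multi_anchor_blast_radius_py := by
  intro timeline max_logs w _
  unfold Spec_extract_multi_anchor_blast_radius_py
  simp only [extract_multi_anchor_blast_radius_py, extract_multi_anchor_blast_radius_py_alt]
  by_cases hsmall : (timeline.length : Int) ≤ max_logs
  · simp [hsmall]
  · rw [if_neg hsmall, if_neg hsmall, pv_anchors_eq]
    by_cases hnil : timeline = []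
    · subst hnil
      simp only [PySem.List.enumerate, List.length_nil, Int.natCast_zero, List.filter_nil, List.map_nil]
      have h1 : ∀ a : Int, PySem.List.pyRange (max (max (a - w) 0) 0) (min (a + w + 1) (0:Int)) 1 = [] :=
        fun a => PySem.List.pyRange_one_eq_nil (by omega)
      have h1 : ∀ a c : Int, ¬ (max (max (a - w) 0) c < min (a + w + 1) (0:Int)) := by
        intro a c; omega
      have h2 : ∀ a : Int, ¬ ((min (a + w + 1) (0:Int)) > 0) := by intro a; omega
      have hsA := pv_sortedA 0 w [0, 0 - 1]
      rw [PySem.List.pyRange_one_eq_nil (le_refl (0:Int)), List.filter_nil] at hsA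
      rw [show (if True then ([0, 0 - 1] : List Int) else []) = [0, 0 - 1] from by simp]
      rw [hsA]
      have hm : max_logs < (0:Int) := by simp only [List.length_nil, Int.natCast_zero] at hsmall; omega
      simp only [List.foldl_cons, List.foldl_nil, if_neg (h1 0 0), if_neg (h1 (0 - 1) 0),
        if_neg (h2 0), if_neg (h2 (0 - 1)), List.length_nil, Int.natCast_zero, if_pos hm]
      simp [PySem.List.slice]
    · have hn1 : 1 ≤ (timeline.length : Int) := by
        have := List.length_pos_of_ne_nil hnil; omega
      set as0 : List Int :=
        ((PySem.List.enumerate timeline 0).filter (fun p => pvB_isAnchor p.2)).map (·.1) with has0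
      set as : List Int := if as0 = [] then [0, (timeline.length : Int) - 1] else as0 with has
      have hsort : as.Pairwise (· ≤ ·) := by
        rw [has]
        split
        · simp; omega
        · exact pv_anchors_sorted timeline
      rw [pv_sortedA ((timeline.length : Int)) w as,
        pv_merge_loop timeline w as [] 0 le_rfl (by omega) hsort,
        List.nil_append, List.length_map]
      split_ifs with h
      · exact (pv_map_slice _ _ _).symm
      · rfl
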